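-- pv_equiv track=rewrite | github.com/motu-tool/mOTUs | bin/map_genes_to_mOTUs.py | filterInsert_getHighestScoringHit
-- ===== SOURCE A (Python) =====
-- def filterInsert_getHighestScoringHit(listInsertSAMdicts, dictRef2alignmentScore):
--     #find best alignmentScore
--     listInsertSAMdicts_besthit = []
--     bestAlignmentScore = 0
--     if (len(listInsertSAMdicts) >= 1):
--         for dictSAMline in listInsertSAMdicts:
--             currRefname = dictSAMline["refname"]
--             alignmentScore = dictRef2alignmentScore[currRefname]
--             if ( alignmentScore > bestAlignmentScore ):
--                 listInsertSAMdicts_besthit = []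
--             if ( alignmentScore >= bestAlignmentScore ):
--                 bestAlignmentScore = alignmentScore
--                 listInsertSAMdicts_besthit.append(dictSAMline)
--
--     return(listInsertSAMdicts_besthit)
-- ===== SOURCE B (Python) =====
-- def filterInsert_getHighestScoringHit(listInsertSAMdicts, dictRef2alignmentScore):
--     # two-pass: compute all scores, take the max (floored at 0, matching the
--     # function's contract that hits scoring below 0 are never kept), filter ties
--     if not listInsertSAMdicts:
--         return []
--     scores = [dictRef2alignmentScore[d["refname"]] for d in listInsertSAMdicts]
--     best = max(max(scores), 0)
--     return [d for d, s in zip(listInsertSAMdicts, scores) if s == best]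
-- ===== Notes on version B (the rewrite author's own statement) =====
-- stated objective: simpler
-- what changed: A's fused single scan with a running best score and in-loop reset of the kept list is replaced by a two-pass compute-all-scores / take-max-floored-at-0 / filter-ties decomposition.
import Mathlib
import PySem

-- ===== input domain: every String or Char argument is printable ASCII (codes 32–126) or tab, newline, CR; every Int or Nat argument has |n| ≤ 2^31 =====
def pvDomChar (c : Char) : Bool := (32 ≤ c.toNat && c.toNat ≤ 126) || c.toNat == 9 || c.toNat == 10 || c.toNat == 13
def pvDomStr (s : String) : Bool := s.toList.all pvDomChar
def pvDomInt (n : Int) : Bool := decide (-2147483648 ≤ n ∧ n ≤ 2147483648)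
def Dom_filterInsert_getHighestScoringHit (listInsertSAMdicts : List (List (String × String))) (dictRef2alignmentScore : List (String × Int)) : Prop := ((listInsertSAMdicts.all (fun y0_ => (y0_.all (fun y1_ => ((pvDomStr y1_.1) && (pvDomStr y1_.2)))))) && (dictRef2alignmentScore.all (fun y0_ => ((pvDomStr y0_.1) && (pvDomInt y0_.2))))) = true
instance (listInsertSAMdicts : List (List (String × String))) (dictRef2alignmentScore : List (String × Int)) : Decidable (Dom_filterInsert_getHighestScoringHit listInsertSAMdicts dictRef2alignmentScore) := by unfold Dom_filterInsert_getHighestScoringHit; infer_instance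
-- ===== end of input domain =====

-- B replaces A's fused running-best scan (with in-loop reset) by a simpler
-- two-pass decomposition: compute all scores, take max(·, 0), filter the ties.


-- ===== PORT A =====
def filterInsert_getHighestScoringHit (listInsertSAMdicts : List (List (String × String))) (dictRef2alignmentScore : List (String × Int)) : List (List (String × String)) :=
  -- state: (listInsertSAMdicts_besthit, bestAlignmentScore)
  if listInsertSAMdicts.length ≥ 1 then
    (listInsertSAMdicts.foldl
      (fun (st : List (List (String × String)) × Int) dictSAMline =>
        let currRefname := (PySem.Dict.mk dictSAMline).getD "refname" ""
        let alignmentScore := (PySem.Dict.mk dictRef2alignmentScore).getD currRefname 0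
        let besthit := if alignmentScore > st.2 then [] else st.1
        if alignmentScore ≥ st.2 then (besthit ++ [dictSAMline], alignmentScore)
        else (besthit, st.2))
      ([], 0)).1
  else []

-- ===== PORT B =====
def filterInsert_getHighestScoringHit_alt (listInsertSAMdicts : List (List (String × String))) (dictRef2alignmentScore : List (String × Int)) : List (List (String × String)) :=
  if listInsertSAMdicts = [] then []
  else
    let scores := listInsertSAMdicts.map
      (fun d => (PySem.Dict.mk dictRef2alignmentScore).getD ((PySem.Dict.mk d).getD "refname" "") 0)
    let best := max ((PySem.List.max? scores (fun y => y)).getD 0) 0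
    ((listInsertSAMdicts.zip scores).filter (fun p => p.2 == best)).map (fun p => p.1)

-- ===== PRECONDITION & SPEC =====
-- Pre_ excludes exactly the inputs on which Python A raises a KeyError (a SAM line
-- without a "refname" key, or a refname absent from dictRef2alignmentScore), and it
-- requires the association lists to have distinct keys, since they stand for Python
-- dicts (which cannot carry duplicate keys).
def Pre_filterInsert_getHighestScoringHit (listInsertSAMdicts : List (List (String × String))) (dictRef2alignmentScore : List (String × Int)) : Prop :=
  (dictRef2alignmentScore.map Prod.fst).Nodup ∧
  ∀ d ∈ listInsertSAMdicts, (d.map Prod.fst).Nodup ∧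
    (((PySem.Dict.mk d).get? "refname").bind
      (fun r => (PySem.Dict.mk dictRef2alignmentScore).get? r)).isSome = true
instance (listInsertSAMdicts : List (List (String × String))) (dictRef2alignmentScore : List (String × Int)) : Decidable (Pre_filterInsert_getHighestScoringHit listInsertSAMdicts dictRef2alignmentScore) := by unfold Pre_filterInsert_getHighestScoringHit; infer_instance

def pvWitness_filterInsert_getHighestScoringHit : (List (List (String × String))) × (List (String × Int)) :=
  ([[("refname", "r1")], [("refname", "r2")], [("refname", "r1")]], [("r1", (3 : Int)), ("r2", 1)])

def Spec_filterInsert_getHighestScoringHit (listInsertSAMdicts : List (List (String × String))) (dictRef2alignmentScore : List (String × Int)) (out : List (List (String × String))) : Prop := out = filterInsert_getHighestScoringHit_alt listInsertSAMdicts dictRef2alignmentScore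
instance (listInsertSAMdicts : List (List (String × String))) (dictRef2alignmentScore : List (String × Int)) (out : List (List (String × String))) : Decidable (Spec_filterInsert_getHighestScoringHit listInsertSAMdicts dictRef2alignmentScore out) := by unfold Spec_filterInsert_getHighestScoringHit; infer_instance

-- ===== CLAIM (what is proved, stated in full; the proofs are below) =====
def Claim_equal_filterInsert_getHighestScoringHit : Prop := ∀ (listInsertSAMdicts : List (List (String × String))) (dictRef2alignmentScore : List (String × Int)), Dom_filterInsert_getHighestScoringHit listInsertSAMdicts dictRef2alignmentScore → Pre_filterInsert_getHighestScoringHit listInsertSAMdicts dictRef2alignmentScore → Spec_filterInsert_getHighestScoringHit listInsertSAMdicts dictRef2alignmentScore (filterInsert_getHighestScoringHit listInsertSAMdicts dictRef2alignmentScore)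

-- ===== LEMMAS AND PROOFS =====

-- the score of one SAM line (used by the proofs only)
def pvScore (dictRef2alignmentScore : List (String × Int)) (d : List (String × String)) : Int :=
  (PySem.Dict.mk dictRef2alignmentScore).getD ((PySem.Dict.mk d).getD "refname" "") 0

theorem foldl_max_pull (t : List Int) : ∀ (a b : Int), t.foldl max (max a b) = max a (t.foldl max b) := by
  induction t with
  | nil => intro a b; rfl
  | cons x t ih =>
    intro a b
    simp only [List.foldl_cons, max_assoc, ih]

-- A's loop, characterised: starting from an accumulator whose elements all score b,
-- the final best score is the running max and the kept list is the tie filter.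
theorem loopA_char (D : List (String × Int)) :
    ∀ (rest : List (List (String × String))) (acc : List (List (String × String))) (b : Int),
      (∀ d ∈ acc, pvScore D d = b) →
      rest.foldl
        (fun (st : List (List (String × String)) × Int) dictSAMline =>
          let currRefname := (PySem.Dict.mk dictSAMline).getD "refname" ""
          let alignmentScore := (PySem.Dict.mk D).getD currRefname 0
          let besthit := if alignmentScore > st.2 then [] else st.1
          if alignmentScore ≥ st.2 then (besthit ++ [dictSAMline], alignmentScore)
          else (besthit, st.2))
        (acc, b)
      = ((if b = (rest.map (pvScore D)).foldl max b then acc else []) ++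
          rest.filter (fun d => pvScore D d = (rest.map (pvScore D)).foldl max b),
         (rest.map (pvScore D)).foldl max b) := by
  intro rest
  induction rest with
  | nil => intro acc b hacc; simp
  | cons d t ih =>
    intro acc b hacc
    simp only [List.foldl_cons, List.map_cons, List.filter_cons]
    by_cases hgt : pvScore D d > b
    · -- strictly better: reset, then append
      rw [if_pos (show _ ≥ _ by simpa [pvScore] using le_of_lt hgt),
          if_pos (show _ > _ by simpa [pvScore] using hgt)]
      rw [show ((PySem.Dict.mk D).getD ((PySem.Dict.mk d).getD "refname" "") 0) = pvScore D d from rfl]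
      simp only [List.nil_append]
      rw [ih [d] (pvScore D d) (by intro x hx; simp at hx; simp [hx])]
      have hmaxeq : (t.map (pvScore D)).foldl max (max b (pvScore D d))
          = (t.map (pvScore D)).foldl max (pvScore D d) := by
        rw [max_eq_right (le_of_lt hgt)]
      have hM' := (PySem.List.le_foldl_max (t.map (pvScore D)) (pvScore D d)).1
      have hbM : b ≠ (t.map (pvScore D)).foldl max (pvScore D d) := by omega
      simp only [hmaxeq, if_neg hbM, List.nil_append, decide_eq_true_eq]
      split_ifs with hd
      · simp
      · simp
    · have hle : pvScore D d ≤ b := not_lt.mp hgt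
      rw [if_neg (show ¬ _ > _ by simpa [pvScore] using hgt)]
      by_cases heq : pvScore D d = b
      · -- tie: append, best unchanged
        rw [if_pos (show _ ≥ _ by simpa [pvScore] using le_of_eq heq.symm)]
        rw [show ((PySem.Dict.mk D).getD ((PySem.Dict.mk d).getD "refname" "") 0) = pvScore D d from rfl]
        rw [ih (acc ++ [d]) (pvScore D d)
              (by intro x hx; rcases List.mem_append.mp hx with h | h
                  · rw [hacc x h, heq]
                  · simp at h; simp [h])]
        simp only [heq, max_self, decide_eq_true_eq]
        split_ifs with hb
        · simp
        · simp
      · -- strictly worse: skip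
        have hlt : pvScore D d < b := lt_of_le_of_ne hle heq
        rw [if_neg (show ¬ _ ≥ _ by simpa [pvScore] using not_le.mpr hlt)]
        rw [ih acc b hacc]
        have hmaxeq : (t.map (pvScore D)).foldl max (max b (pvScore D d))
            = (t.map (pvScore D)).foldl max b := by rw [max_eq_left hle]
        have hble : b ≤ (t.map (pvScore D)).foldl max b :=
          (PySem.List.le_foldl_max (t.map (pvScore D)) b).1
        have hdm : ¬ pvScore D d = (t.map (pvScore D)).foldl max b := by omega
        simp only [hmaxeq]
        simp [hdm]

theorem zip_filter_map (best : Int) (f : List (String × String) → Int) :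
    ∀ (l : List (List (String × String))),
      ((l.zip (l.map f)).filter (fun p => p.2 == best)).map (fun p => p.1)
        = l.filter (fun d => f d == best) := by
  intro l
  induction l with
  | nil => rfl
  | cons d t ih =>
    simp only [List.map_cons, List.zip_cons_cons, List.filter_cons]
    by_cases h : f d == best
    · simp [h, ih]
    · simp [h, ih]

-- ===== VERDICT (by name: the statement is the Claim_ definition above) =====
theorem filterInsert_getHighestScoringHit_spec : Claim_equal_filterInsert_getHighestScoringHit := by
  intro l D _ _
  unfold Spec_filterInsert_getHighestScoringHit
  unfold filterInsert_getHighestScoringHit filterInsert_getHighestScoringHit_alt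
  cases l with
  | nil => simp
  | cons d t =>
    rw [if_pos (by simp), if_neg (by simp)]
    rw [loopA_char D (d :: t) [] 0 (by intro x hx; simp at hx)]
    rw [show (fun (d : List (String × String)) =>
          (PySem.Dict.mk D).getD ((PySem.Dict.mk d).getD "refname" "") 0) = pvScore D from rfl]
    simp only [List.nil_append, ite_self, List.map_cons]
    rw [PySem.List.max?_id_cons]
    simp only [Option.getD_some]
    have hbest : max ((t.map (pvScore D)).foldl max (pvScore D d)) 0
        = (((d :: t).map (pvScore D)).foldl max 0) := by
      simp only [List.map_cons, List.foldl_cons]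
      rw [max_comm, ← foldl_max_pull]
    rw [hbest]
    simp only [← List.map_cons]
    rw [zip_filter_map]
    apply List.filter_congr
    intro x _
    rfl
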